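-- pv_equiv track=rewrite | github.com/amaurycolochos7/scalping_bot_engineV2 | analyzer.py | _count_consecutive_candles
-- ===== SOURCE A (Python) =====
-- def _count_consecutive_candles(candles):
--     """Cuenta velas consecutivas del mismo color desde la última"""
--     if not candles:
--         return 0
--
--     last_color = candles[-1]
--     count = 0
--
--     # Contar desde el final hacia atrás
--     for candle in reversed(candles):
--         if candle == last_color and candle != 'neutral':
--             count += 1
--         else:
--             break
--
--     return count
-- ===== SOURCE B (Python) =====
-- def _count_consecutive_candles(candles):
--     """Forward one-pass run-length grouping; inspect the final group."""
--     color = None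
--     length = 0
--     for c in candles:
--         if c == color:
--             length += 1
--         else:
--             color, length = c, 1
--     if color is None or color == 'neutral':
--         return 0
--     return length
-- ===== Notes on version B (the rewrite author's own statement) =====
-- stated objective: alternative
-- what changed: Replaces the backward early-break counter with a forward one-pass run-length grouping that maintains the current (color, length) group and returns the final group's length (0 if it is 'neutral' or the list is empty).
import Mathlib
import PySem

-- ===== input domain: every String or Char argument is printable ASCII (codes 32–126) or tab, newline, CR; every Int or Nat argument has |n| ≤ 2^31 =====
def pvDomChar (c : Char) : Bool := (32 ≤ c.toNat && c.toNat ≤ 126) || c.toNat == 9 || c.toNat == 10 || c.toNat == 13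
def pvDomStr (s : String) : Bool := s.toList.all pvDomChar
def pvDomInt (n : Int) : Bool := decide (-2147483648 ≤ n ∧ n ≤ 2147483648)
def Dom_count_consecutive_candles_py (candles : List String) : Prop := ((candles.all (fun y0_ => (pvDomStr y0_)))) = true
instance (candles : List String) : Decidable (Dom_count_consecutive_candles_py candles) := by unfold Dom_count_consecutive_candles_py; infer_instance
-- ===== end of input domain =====

-- B replaces A's backward early-break counter with a forward one-pass run-length grouping (alternative decomposition, same cost).


-- ===== PORT A =====
-- the 'for candle in reversed(candles): … else: break' loop, with the running count as accumulator
def pvALoop (last : String) (count : Int) : List String → Int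
  | [] => count
  | candle :: rest =>
      if candle = last ∧ candle ≠ "neutral" then pvALoop last (count + 1) rest
      else count

def count_consecutive_candles_py (candles : List String) : Int :=
  if candles = [] then 0
  else
    let last_color := candles.getLastD ""
    pvALoop last_color 0 candles.reverse

-- ===== PORT B =====
-- one forward pass keeping the current group as (color?, length)
def pvBStep (st : Option String × Int) (c : String) : Option String × Int :=
  if some c = st.1 then (st.1, st.2 + 1) else (some c, 1)

def count_consecutive_candles_py_alt (candles : List String) : Int :=
  let st := candles.foldl pvBStep (none, 0)
  match st.1 with
  | none => 0
  | some color => if color = "neutral" then 0 else st.2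

-- ===== PRECONDITION & SPEC =====
def Spec_count_consecutive_candles_py (candles : List String) (out : Int) : Prop := out = count_consecutive_candles_py_alt candles
instance (candles : List String) (out : Int) : Decidable (Spec_count_consecutive_candles_py candles out) := by unfold Spec_count_consecutive_candles_py; infer_instance

-- ===== CLAIM (what is proved, stated in full; the proofs are below) =====
def Claim_equal_count_consecutive_candles_py : Prop := ∀ (candles : List String), Dom_count_consecutive_candles_py candles → Spec_count_consecutive_candles_py candles (count_consecutive_candles_py candles)

-- ===== LEMMAS AND PROOFS =====

theorem pvALoop_acc (last : String) (m : List String) :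
    ∀ count : Int, pvALoop last count m = count + pvALoop last 0 m := by
  induction m with
  | nil => intro count; simp [pvALoop]
  | cons c r ih =>
      intro count
      by_cases h : c = last ∧ c ≠ "neutral"
      · rw [pvALoop, if_pos h, pvALoop, if_pos h, ih (count + 1), ih (0 + 1)]; ring
      · rw [pvALoop, if_neg h, pvALoop, if_neg h]; ring

theorem pvALoop_cons (last c : String) (r : List String) :
    pvALoop last 0 (c :: r) =
      if c = last ∧ c ≠ "neutral" then 1 + pvALoop last 0 r else 0 := by
  by_cases h : c = last ∧ c ≠ "neutral"
  · rw [pvALoop, if_pos h, if_pos h, pvALoop_acc]; ring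
  · rw [pvALoop, if_neg h, if_neg h]

-- loop invariant: the fold state is (last group's color, its length), and pvALoop reads it off the reverse
theorem pvInv (l : List String) :
    (l = [] ∧ l.foldl pvBStep (none, 0) = (none, 0)) ∨
    (∃ c k, l.foldl pvBStep (none, 0) = (some c, k) ∧ c = l.getLastD "" ∧
      (∀ x, pvALoop x 0 l.reverse = if x = c ∧ x ≠ "neutral" then k else 0)) := by
  induction l using List.reverseRecOn with
  | nil => left; simp
  | append_singleton xs x ih =>
      right
      have hfold : (xs ++ [x]).foldl pvBStep (none, 0) =
          pvBStep (xs.foldl pvBStep (none, 0)) x := by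
        rw [List.foldl_append]; rfl
      have hrev : (xs ++ [x]).reverse = x :: xs.reverse := by simp
      rcases ih with ⟨hnil, hst⟩ | ⟨c, k, hst, hc, hloop⟩
      · refine ⟨x, 1, ?_, ?_, ?_⟩
        · rw [hfold, hst]; simp [pvBStep]
        · simp
        · intro y
          subst hnil
          rw [hrev, pvALoop_cons]
          simp only [List.reverse_nil, pvALoop]
          have hiff : (x = y ∧ x ≠ "neutral") ↔ (y = x ∧ y ≠ "neutral") := by
            constructor <;> rintro ⟨rfl, h⟩ <;> exact ⟨rfl, h⟩
          simp only [hiff]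
          split_ifs <;> ring
      · by_cases hx : x = c
        · refine ⟨c, k + 1, ?_, ?_, ?_⟩
          · rw [hfold, hst]; simp [pvBStep, hx]
          · simp [hx]
          · intro y
            rw [hrev, pvALoop_cons, hloop y]
            subst hx
            have hiff : (x = y ∧ x ≠ "neutral") ↔ (y = x ∧ y ≠ "neutral") := by
              constructor <;> rintro ⟨rfl, h⟩ <;> exact ⟨rfl, h⟩
            simp only [hiff]
            split_ifs <;> ring
        · refine ⟨x, 1, ?_, ?_, ?_⟩
          · rw [hfold, hst]; simp [pvBStep, hx]
          · simp
          · intro y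
            rw [hrev, pvALoop_cons, hloop y]
            have hiff : (x = y ∧ x ≠ "neutral") ↔ (y = x ∧ y ≠ "neutral") := by
              constructor <;> rintro ⟨rfl, h⟩ <;> exact ⟨rfl, h⟩
            simp only [hiff]
            split_ifs with hA hB
            · exact absurd (hA.1.symm.trans hB.1) hx
            · ring
            · rfl

-- ===== VERDICT (by name: the statement is the Claim_ definition above) =====
theorem count_consecutive_candles_py_spec : Claim_equal_count_consecutive_candles_py := by
  intro candles _
  unfold Spec_count_consecutive_candles_py count_consecutive_candles_py count_consecutive_candles_py_alt
  rcases pvInv candles with ⟨rfl, hst⟩ | ⟨c, k, hst, hc, hloop⟩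
  · simp [hst]
  · have hne : candles ≠ [] := by
      rintro rfl
      simp at hst
    rw [if_neg hne]
    simp only [hst]
    rw [← hc, hloop c]
    by_cases h : c = "neutral" <;> simp [h]
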